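-- pv_equiv track=rewrite | github.com/pcw109550/problem-solving | LeetCode/number-of-valid-words-in-a-sentence.py | check
-- ===== SOURCE A (Python) =====
-- def check(token: str) -> bool:
--     N = len(token)
--     hyphenCnt = 0
--     for i in range(N):
--         if token[i].isdigit():
--             return False
--         elif token[i] == '-':
--             if hyphenCnt == 1:
--                 return False
--             if i == 0 or i == N - 1:
--                 return False
--             hyphenCnt = 1
--             if not token[i - 1].isalpha() or not token[i + 1].isalpha():
--                 return False
--         elif token[i] in ".!,":
--             if i != N - 1:
--                 return False
--     return True
-- ===== SOURCE B (Python) =====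
-- def check(token: str) -> bool:
--     # Independent whole-token property checks instead of one fused indexed loop.
--     if any(ch.isdigit() for ch in token):
--         return False
--     n = len(token)
--     hy = [i for i in range(n) if token[i] == '-']
--     if len(hy) > 1:
--         return False
--     if len(hy) == 1:
--         i = hy[0]
--         if not (0 < i < n - 1 and token[i - 1].isalpha() and token[i + 1].isalpha()):
--             return False
--     return all(i == n - 1 for i in range(n) if token[i] in ".!,")
-- ===== Notes on version B (the rewrite author's own statement) =====
-- stated objective: simpler
-- what changed: Replaces A's single fused index loop carrying a hyphen counter and early returns with three independent whole-token property checks: a digit scan, the list of hyphen positions (at most one, interior with alpha neighbours), and a punctuation-only-at-last-index check.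
import Mathlib
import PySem

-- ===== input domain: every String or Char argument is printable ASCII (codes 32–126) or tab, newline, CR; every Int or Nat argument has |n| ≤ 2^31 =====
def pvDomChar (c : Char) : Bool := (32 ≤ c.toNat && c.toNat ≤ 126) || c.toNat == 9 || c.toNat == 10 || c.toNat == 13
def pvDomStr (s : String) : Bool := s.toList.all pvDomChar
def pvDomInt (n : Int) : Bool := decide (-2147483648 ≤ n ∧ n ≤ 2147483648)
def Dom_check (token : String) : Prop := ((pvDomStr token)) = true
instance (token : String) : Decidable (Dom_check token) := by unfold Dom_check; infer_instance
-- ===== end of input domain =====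

-- B replaces A's fused indexed loop (with a hyphen counter and early returns) by independent
-- whole-token property checks; objective: simpler. Same result on every input.

-- ===== PORT A =====
-- token[i], token[i-1], token[i+1] are read with List.getD; every such access in A is
-- guarded to be in range (0 ≤ index < N), so getD with a dummy default is exact.
def checkLoop (cs : List Char) (n i hc : Nat) : Bool :=
  if _h : i < n then
    if PySem.Chars.isdigit (cs.getD i ' ') then false
    else if cs.getD i ' ' = '-' then
      if hc = 1 then false
      else if i = 0 ∨ i = n - 1 then false
      else if ¬ PySem.Chars.isalpha (cs.getD (i-1) ' ') = true
              ∨ ¬ PySem.Chars.isalpha (cs.getD (i+1) ' ') = true then false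
      else checkLoop cs n (i+1) 1
    else if cs.getD i ' ' ∈ ['.', '!', ','] then
      if i ≠ n - 1 then false
      else checkLoop cs n (i+1) hc
    else checkLoop cs n (i+1) hc
  else true
termination_by n - i

def check (token : String) : Bool :=
  checkLoop token.toList token.toList.length 0 0

-- ===== PORT B =====
def punctOkB (cs : List Char) (n : Nat) : Bool :=
  ((List.range n).filter (fun i => cs.getD i ' ' ∈ ['.', '!', ','])).all (fun i => i = n - 1)

def check_alt (token : String) : Bool :=
  let cs := token.toList
  let n := cs.length
  if cs.any PySem.Chars.isdigit then false
  else
    let hy := (List.range n).filter (fun i => cs.getD i ' ' = '-')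
    if 1 < hy.length then false
    else if hy.length = 1 then
      let i := hy.headD 0
      if 0 < i ∧ i < n - 1 ∧ PySem.Chars.isalpha (cs.getD (i-1) ' ') = true
           ∧ PySem.Chars.isalpha (cs.getD (i+1) ' ') = true
      then punctOkB cs n else false
    else punctOkB cs n

-- ===== PRECONDITION & SPEC =====
def Spec_check (token : String) (out : Bool) : Prop := out = check_alt token
instance (token : String) (out : Bool) : Decidable (Spec_check token out) := by unfold Spec_check; infer_instance

-- ===== CLAIM (what is proved, stated in full; the proofs are below) =====
def Claim_equal_check : Prop := ∀ (token : String), Dom_check token → Spec_check token (check token)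

-- ===== LEMMAS AND PROOFS =====

-- a hyphen at position j is well-placed: interior with alphabetic neighbours
def hyGood (cs : List Char) (n j : Nat) : Prop :=
  0 < j ∧ j < n - 1 ∧ PySem.Chars.isalpha (cs.getD (j-1) ' ') = true
    ∧ PySem.Chars.isalpha (cs.getD (j+1) ' ') = true

-- what remains to hold on positions [i, n) given that hc hyphens were already seen
def Valid (cs : List Char) (n i hc : Nat) : Prop :=
  (∀ j, i ≤ j → j < n →
      PySem.Chars.isdigit (cs.getD j ' ') = false
      ∧ (cs.getD j ' ' ∈ ['.', '!', ','] → j = n - 1)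
      ∧ (cs.getD j ' ' = '-' → hc = 0 ∧ hyGood cs n j))
  ∧ (∀ j k, i ≤ j → j < k → k < n →
      cs.getD j ' ' = '-' → cs.getD k ' ' = '-' → False)

theorem checkLoop_iff (cs : List Char) (n : Nat) :
    ∀ d i hc, (hc = 0 ∨ hc = 1) → n - i ≤ d → (checkLoop cs n i hc = true ↔ Valid cs n i hc) := by
  intro d
  induction d with
  | zero =>
      intro i hc hhc hd
      have hni : ¬ i < n := by omega
      rw [checkLoop, dif_neg hni]
      constructor
      · intro _
        exact ⟨fun j hj hjn => absurd (by omega : i < n) hni,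
               fun j k hj hjk hkn _ _ => hni (by omega)⟩
      · intro _; rfl
  | succ d ih =>
      intro i hc hhc hd
      by_cases hin : i < n
      · rw [checkLoop, dif_pos hin]
        by_cases hdig : PySem.Chars.isdigit (cs.getD i ' ') = true
        · rw [if_pos hdig]
          constructor
          · intro h; cases h
          · intro hV
            have h1 := (hV.1 i le_rfl hin).1
            rw [hdig] at h1; cases h1
        · rw [if_neg hdig]
          have hdig' : PySem.Chars.isdigit (cs.getD i ' ') = false :=
            Bool.eq_false_iff.mpr hdig
          by_cases hhy : cs.getD i ' ' = '-'
          · rw [if_pos hhy]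
            by_cases hc1 : hc = 1
            · rw [if_pos hc1]
              constructor
              · intro h; cases h
              · intro hV
                have := ((hV.1 i le_rfl hin).2.2 hhy).1
                omega
            · rw [if_neg hc1]
              by_cases hbd : i = 0 ∨ i = n - 1
              · rw [if_pos hbd]
                constructor
                · intro h; cases h
                · intro hV
                  rcases ((hV.1 i le_rfl hin).2.2 hhy).2 with ⟨h1, h2, _⟩
                  omega
              · rw [if_neg hbd]
                by_cases hal : ¬ PySem.Chars.isalpha (cs.getD (i-1) ' ') = true
                    ∨ ¬ PySem.Chars.isalpha (cs.getD (i+1) ' ') = true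
                · rw [if_pos hal]
                  constructor
                  · intro h; cases h
                  · intro hV
                    rcases ((hV.1 i le_rfl hin).2.2 hhy).2 with ⟨_, _, ha1, ha2⟩
                    rcases hal with h | h
                    · exact (h ha1).elim
                    · exact (h ha2).elim
                · rw [if_neg hal]
                  rw [ih (i+1) 1 (Or.inr rfl) (by omega)]
                  push Not at hal hbd
                  have hc0 : hc = 0 := by rcases hhc with h | h <;> omega
                  constructor
                  · intro hV
                    refine ⟨?_, ?_⟩
                    · intro j hj hjn
                      rcases Nat.eq_or_lt_of_le hj with rfl | hj'
                      · refine ⟨hdig', ?_, ?_⟩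
                        · intro hp; rw [hhy] at hp; simp at hp
                        · intro _
                          exact ⟨hc0, by omega, by omega, hal.1, hal.2⟩
                      · have h1 := hV.1 j (by omega) hjn
                        refine ⟨h1.1, h1.2.1, ?_⟩
                        intro hj2
                        exact absurd ((h1.2.2 hj2).1) (by omega)
                    · intro j k hj hjk hkn hj2 hk2
                      rcases Nat.eq_or_lt_of_le hj with rfl | hj'
                      · exact absurd ((hV.1 k (by omega) hkn).2.2 hk2).1 (by omega)
                      · exact hV.2 j k (by omega) hjk hkn hj2 hk2
                  · intro hV
                    refine ⟨?_, ?_⟩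
                    · intro j hj hjn
                      have h1 := hV.1 j (by omega) hjn
                      refine ⟨h1.1, h1.2.1, ?_⟩
                      intro hj2
                      exact absurd (hV.2 i j le_rfl (by omega) hjn hhy hj2) (by simp)
                    · intro j k hj hjk hkn hj2 hk2
                      exact hV.2 j k (by omega) hjk hkn hj2 hk2
          · rw [if_neg hhy]
            by_cases hp : cs.getD i ' ' ∈ ['.', '!', ',']
            · rw [if_pos hp]
              by_cases hlast : i ≠ n - 1
              · rw [if_pos hlast]
                constructor
                · intro h; cases h
                · intro hV; exact (hlast ((hV.1 i le_rfl hin).2.1 hp)).elim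
              · rw [if_neg hlast]
                push Not at hlast
                rw [ih (i+1) hc hhc (by omega)]
                constructor
                · intro _
                  refine ⟨?_, ?_⟩
                  · intro j hj hjn
                    have hji : j = i := by omega
                    subst hji
                    exact ⟨hdig', fun _ => hlast, fun h => absurd h hhy⟩
                  · intro j k hj hjk hkn _ _; omega
                · intro hV
                  refine ⟨fun j hj hjn => hV.1 j (by omega) hjn, ?_⟩
                  intro j k hj hjk hkn hj2 hk2
                  exact hV.2 j k (by omega) hjk hkn hj2 hk2
            · rw [if_neg hp]
              rw [ih (i+1) hc hhc (by omega)]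
              constructor
              · intro hV
                refine ⟨?_, ?_⟩
                · intro j hj hjn
                  rcases Nat.eq_or_lt_of_le hj with rfl | hj'
                  · exact ⟨hdig', fun h => absurd h hp, fun h => absurd h hhy⟩
                  · exact hV.1 j (by omega) hjn
                · intro j k hj hjk hkn hj2 hk2
                  rcases Nat.eq_or_lt_of_le hj with rfl | hj'
                  · exact hhy hj2
                  · exact hV.2 j k (by omega) hjk hkn hj2 hk2
              · intro hV
                exact ⟨fun j hj hjn => hV.1 j (by omega) hjn,
                       fun j k hj hjk hkn hj2 hk2 => hV.2 j k (by omega) hjk hkn hj2 hk2⟩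
      · rw [checkLoop, dif_neg hin]
        constructor
        · intro _
          exact ⟨fun j hj hjn => absurd (by omega : i < n) hin,
                 fun j k hj hjk hkn _ _ => hin (by omega)⟩
        · intro _; rfl

theorem anyDigit_false_iff (cs : List Char) :
    cs.any PySem.Chars.isdigit = false ↔
    ∀ j, j < cs.length → PySem.Chars.isdigit (cs.getD j ' ') = false := by
  rw [List.any_eq_false]
  constructor
  · intro h j hj
    rw [List.getD_eq_getElem cs ' ' hj]
    exact Bool.eq_false_iff.mpr (h _ (cs.getElem_mem hj))
  · intro h x hx
    obtain ⟨j, hj, rfl⟩ := List.mem_iff_getElem.mp hx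
    rw [Bool.not_eq_true, ← List.getD_eq_getElem cs ' ' hj]
    exact h j hj

theorem punctOkB_iff (cs : List Char) (n : Nat) :
    punctOkB cs n = true ↔
    ∀ j, j < n → cs.getD j ' ' ∈ ['.', '!', ','] → j = n - 1 := by
  simp [punctOkB, List.all_eq_true, List.mem_range]
  constructor <;> (intro h j hj; have := h j hj; tauto)

theorem mem_hyList_iff (cs : List Char) (j : Nat) :
    j ∈ (List.range cs.length).filter (fun i => cs.getD i ' ' = '-') ↔
    j < cs.length ∧ cs.getD j ' ' = '-' := by
  simp [List.mem_filter, List.mem_range]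

theorem one_lt_hyList_iff (cs : List Char) :
    1 < ((List.range cs.length).filter (fun i => cs.getD i ' ' = '-')).length ↔
    ∃ j k, j < k ∧ k < cs.length ∧ cs.getD j ' ' = '-' ∧ cs.getD k ' ' = '-' := by
  have hnd : ((List.range cs.length).filter (fun i => cs.getD i ' ' = '-')).Nodup :=
    List.Nodup.filter _ (List.nodup_range)
  constructor
  · intro h
    have h0 : 0 < ((List.range cs.length).filter (fun i => cs.getD i ' ' = '-')).length := by omega
    set hy := (List.range cs.length).filter (fun i => cs.getD i ' ' = '-') with hhy
    have hb0 : 0 < hy.length := by omega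
    have hb1 : 1 < hy.length := by omega
    have ha : hy[0]'hb0 ∈ hy := List.getElem_mem _
    have hb : hy[1]'hb1 ∈ hy := List.getElem_mem _
    have hab : hy[0]'hb0 ≠ hy[1]'hb1 := by
      intro he
      have := (List.Nodup.getElem_inj_iff hnd).mp he
      omega
    have ha' := (mem_hyList_iff cs (hy[0]'hb0)).mp ha
    have hb' := (mem_hyList_iff cs (hy[1]'hb1)).mp hb
    rcases Nat.lt_trichotomy (hy[0]'hb0) (hy[1]'hb1) with hlt | heq | hgt
    · exact ⟨hy[0]'hb0, hy[1]'hb1, hlt, hb'.1, ha'.2, hb'.2⟩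
    · exact absurd heq hab
    · exact ⟨hy[1]'hb1, hy[0]'hb0, hgt, ha'.1, hb'.2, ha'.2⟩
  · rintro ⟨j, k, hjk, hkn, hj2, hk2⟩
    have hj := (mem_hyList_iff cs j).mpr ⟨by omega, hj2⟩
    have hk := (mem_hyList_iff cs k).mpr ⟨hkn, hk2⟩
    obtain ⟨i1, hi1, e1⟩ := List.mem_iff_getElem.mp hj
    obtain ⟨i2, hi2, e2⟩ := List.mem_iff_getElem.mp hk
    by_contra hle
    have : i1 = i2 := by omega
    subst this
    omega

theorem mem_eq_headD_of_length_one {l : List Nat} (h : l.length = 1) {j : Nat} (hj : j ∈ l) :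
    j = l.headD 0 := by
  cases l with
  | nil => simp at h
  | cons a t =>
      have ht : t = [] := by
        cases t with
        | nil => rfl
        | cons b u => simp at h
      subst ht
      simpa using hj

theorem check_alt_iff (token : String) :
    check_alt token = true ↔ Valid token.toList token.toList.length 0 0 := by
  simp only [check_alt]
  set cs := token.toList with hcs
  set n := cs.length with hn
  by_cases hd : cs.any PySem.Chars.isdigit = true
  · rw [if_pos hd]
    constructor
    · intro h; cases h
    · intro hV
      obtain ⟨x, hx, hpx⟩ := List.any_eq_true.mp hd
      obtain ⟨j, hj, rfl⟩ := List.mem_iff_getElem.mp hx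
      have := (hV.1 j (by omega) hj).1
      rw [List.getD_eq_getElem cs ' ' hj] at this
      rw [this] at hpx; cases hpx
  · rw [if_neg hd]
    have hdall := (anyDigit_false_iff cs).mp (Bool.eq_false_iff.mpr hd)
    by_cases h2 : 1 < ((List.range n).filter (fun i => cs.getD i ' ' = '-')).length
    · rw [if_pos h2]
      constructor
      · intro h; cases h
      · intro hV
        rw [hn] at h2
        obtain ⟨j, k, hjk, hkn, hj2, hk2⟩ := (one_lt_hyList_iff cs).mp h2
        exact (hV.2 j k (Nat.zero_le _) hjk hkn hj2 hk2).elim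
    · rw [if_neg h2]
      by_cases h1 : ((List.range n).filter (fun i => cs.getD i ' ' = '-')).length = 1
      · rw [if_pos h1]
        set i := ((List.range n).filter (fun i => cs.getD i ' ' = '-')).headD 0 with hi
        have himem : i ∈ (List.range n).filter (fun i => cs.getD i ' ' = '-') := by
          rw [hi]
          cases he : (List.range n).filter (fun i => cs.getD i ' ' = '-') with
          | nil => rw [he] at h1; simp at h1
          | cons a t => simp
        have hiprop := (mem_hyList_iff cs i).mp (by rw [hn] at himem; exact himem)
        by_cases hg : 0 < i ∧ i < n - 1 ∧ PySem.Chars.isalpha (cs.getD (i-1) ' ') = true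
             ∧ PySem.Chars.isalpha (cs.getD (i+1) ' ') = true
        · rw [if_pos hg]
          rw [punctOkB_iff]
          constructor
          · intro hp
            refine ⟨?_, ?_⟩
            · intro j hj hjn
              refine ⟨hdall j hjn, hp j hjn, ?_⟩
              intro hj2
              have : j = i := mem_eq_headD_of_length_one h1
                ((mem_hyList_iff cs j).mpr ⟨by rw [← hn]; exact hjn, hj2⟩)
              subst this
              exact ⟨rfl, hg.1, hg.2.1, hg.2.2.1, hg.2.2.2⟩
            · intro j k hj hjk hkn hj2 hk2
              have ej : j = i := mem_eq_headD_of_length_one h1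
                ((mem_hyList_iff cs j).mpr ⟨by omega, hj2⟩)
              have ek : k = i := mem_eq_headD_of_length_one h1
                ((mem_hyList_iff cs k).mpr ⟨by rw [← hn]; exact hkn, hk2⟩)
              omega
          · intro hV j hj hjn
            exact (hV.1 j (Nat.zero_le _) hj).2.1 hjn
        · rw [if_neg hg]
          constructor
          · intro h; cases h
          · intro hV
            have := ((hV.1 i (Nat.zero_le _) (by rw [hn]; exact hiprop.1)).2.2 hiprop.2).2
            exact (hg ⟨this.1, this.2.1, this.2.2.1, this.2.2.2⟩).elim
      · rw [if_neg h1]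
        have h0 : ((List.range n).filter (fun i => cs.getD i ' ' = '-')).length = 0 := by omega
        have hnohy : ∀ j, j < n → cs.getD j ' ' ≠ '-' := by
          intro j hjn hj2
          have := (mem_hyList_iff cs j).mpr ⟨by rw [← hn]; exact hjn, hj2⟩
          rw [← hn] at this
          rw [List.length_eq_zero_iff] at h0
          rw [h0] at this
          cases this
        rw [punctOkB_iff]
        constructor
        · intro hp
          refine ⟨?_, ?_⟩
          · intro j hj hjn
            exact ⟨hdall j hjn, hp j hjn, fun h => (hnohy j hjn h).elim⟩
          · intro j k hj hjk hkn hj2 hk2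
            exact hnohy k hkn hk2
        · intro hV j hj hjn
          exact (hV.1 j (Nat.zero_le _) hj).2.1 hjn

-- ===== VERDICT (by name: the statement is the Claim_ definition above) =====
theorem check_spec : Claim_equal_check := by
  intro token _
  unfold Spec_check
  have hA : check token = true ↔ Valid token.toList token.toList.length 0 0 := by
    rw [check]
    exact checkLoop_iff token.toList token.toList.length token.toList.length 0 0
      (Or.inl rfl) (by omega)
  have hB := check_alt_iff token
  have : check token = true ↔ check_alt token = true := hA.trans hB.symm
  cases h1 : check token <;> cases h2 : check_alt token <;> simp_all
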